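-- pv_equiv track=rewrite | github.com/nsmith/markpost | src/markpost/formatter.py | _split_on_words
-- ===== SOURCE A (Python) =====
-- def _split_on_words(text: str, max_chars: int) -> list[str]:
--     """Last-resort split on word boundaries."""
--     words = text.split()
--     parts: list[str] = []
--     current = ""
--
--     for word in words:
--         # If a single word exceeds max_chars, hard-split it
--         while len(word) > max_chars:
--             if current:
--                 parts.append(current)
--                 current = ""
--             parts.append(word[:max_chars])
--             word = word[max_chars:]
--
--         if not word:
--             continue
--
--         if not current:
--             current = word
--         elif len(current) + 1 + len(word) <= max_chars:
--             current = current + " " + word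
--         else:
--             parts.append(current)
--             current = word
--
--     if current:
--         parts.append(current)
--
--     return parts
-- ===== SOURCE B (Python) =====
-- def _split_on_words(text: str, max_chars: int) -> list[str]:
--     """Last-resort split on word boundaries."""
--     # Pass 1: flatten the words into atoms of length <= max_chars.
--     atoms = [word[i:i + max_chars]
--              for word in text.split()
--              for i in range(0, len(word), max_chars)]
--     # Pass 2: greedily pack the atoms; a full-width atom flushes on its own.
--     parts: list[str] = []
--     current = ""
--     for atom in atoms:
--         if not current:
--             current = atom
--         elif len(current) + 1 + len(atom) <= max_chars:
--             current = current + " " + atom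
--         else:
--             parts.append(current)
--             current = atom
--     if current:
--         parts.append(current)
--     return parts
-- ===== Notes on version B (the rewrite author's own statement) =====
-- stated objective: alternative
-- what changed: Replaces A's in-loop 'while' hard-splitter that mutates word and current mid-iteration with a two-pass decomposition: a first pass flattens all words into fixed-size atoms by range-based slicing, then one plain greedy packing pass runs over the flat atom list (a full-width atom flushes on its own).
import Mathlib
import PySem

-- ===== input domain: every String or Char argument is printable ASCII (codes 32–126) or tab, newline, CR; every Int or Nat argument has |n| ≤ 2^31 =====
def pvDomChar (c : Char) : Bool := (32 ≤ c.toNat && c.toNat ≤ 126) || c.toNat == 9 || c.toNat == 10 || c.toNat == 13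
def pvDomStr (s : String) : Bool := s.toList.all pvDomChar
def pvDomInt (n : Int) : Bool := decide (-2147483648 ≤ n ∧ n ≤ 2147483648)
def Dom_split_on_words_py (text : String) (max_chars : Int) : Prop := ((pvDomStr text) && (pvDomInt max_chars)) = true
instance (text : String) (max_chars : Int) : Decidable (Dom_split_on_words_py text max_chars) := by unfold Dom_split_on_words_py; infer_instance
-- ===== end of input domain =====

-- B replaces A's in-loop while-hard-splitter by a two-pass decomposition (flatten words
-- into fixed-size atoms, then one greedy packing pass); same cost, alternative structure.


-- ===== PORT A =====
-- Words are handled as List Char (PySem.Chars); output strings are rebuilt with String.ofList.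
-- A's inner 'while' is ported with fuel = word length: exact whenever 1 ≤ max_chars
-- (each pass strips max_chars ≥ 1 characters), i.e. on all of Pre_.
def pvHardSplitA (m : Int) :
    Nat → List (List Char) × List Char → List Char → List (List Char) × List Char × List Char
  | 0, st, w => (st.1, st.2, w)
  | fuel+1, st, w =>
    if m < (w.length : Int) then
      pvHardSplitA m fuel
        ((if st.2 = [] then st.1 else st.1 ++ [st.2]) ++ [PySem.List.slice w none (some m)], [])
        (PySem.List.slice w (some m) none)
    else (st.1, st.2, w)

def pvStepA (m : Int) (st : List (List Char) × List Char) (word : List Char) :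
    List (List Char) × List Char :=
  let r := pvHardSplitA m word.length st word
  let parts := r.1
  let cur := r.2.1
  let w := r.2.2
  if w = [] then (parts, cur)
  else if cur = [] then (parts, w)
  else if (cur.length : Int) + 1 + (w.length : Int) ≤ m then (parts, cur ++ ' ' :: w)
  else (parts ++ [cur], w)

def split_on_words_py (text : String) (max_chars : Int) : List String :=
  let words := PySem.Chars.split₀ text.toList
  let r := words.foldl (pvStepA max_chars) ([], [])
  (if r.2 = [] then r.1 else r.1 ++ [r.2]).map String.ofList

-- ===== PORT B =====
def pvAtomsB (m : Int) (word : List Char) : List (List Char) :=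
  (PySem.List.pyRange 0 (word.length : Int) m).map
    (fun i => PySem.List.slice word (some i) (some (i + m)))

def pvStepB (m : Int) (st : List (List Char) × List Char) (atom : List Char) :
    List (List Char) × List Char :=
  if st.2 = [] then (st.1, atom)
  else if (st.2.length : Int) + 1 + (atom.length : Int) ≤ m then (st.1, st.2 ++ ' ' :: atom)
  else (st.1 ++ [st.2], atom)

def split_on_words_py_alt (text : String) (max_chars : Int) : List String :=
  let atoms := (PySem.Chars.split₀ text.toList).flatMap (pvAtomsB max_chars)
  let r := atoms.foldl (pvStepB max_chars) ([], [])
  (if r.2 = [] then r.1 else r.1 ++ [r.2]).map String.ofList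

-- ===== PRECONDITION & SPEC =====
-- Pre_ excludes exactly max_chars ≤ 0 combined with a text that contains at least one word:
-- there Python A never returns (the while-loop cannot shrink the word below max_chars).
def Pre_split_on_words_py (text : String) (max_chars : Int) : Prop :=
  1 ≤ max_chars ∨ PySem.Chars.split₀ text.toList = []
instance (text : String) (max_chars : Int) : Decidable (Pre_split_on_words_py text max_chars) := by
  unfold Pre_split_on_words_py; infer_instance

def pvWitness_split_on_words_py : String × Int := ("hello wonderful world", 7)

def Spec_split_on_words_py (text : String) (max_chars : Int) (out : List String) : Prop := out = split_on_words_py_alt text max_chars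
instance (text : String) (max_chars : Int) (out : List String) : Decidable (Spec_split_on_words_py text max_chars out) := by unfold Spec_split_on_words_py; infer_instance

-- ===== CLAIM (what is proved, stated in full; the proofs are below) =====
def Claim_equal_split_on_words_py : Prop := ∀ (text : String) (max_chars : Int), Dom_split_on_words_py text max_chars → Pre_split_on_words_py text max_chars → Spec_split_on_words_py text max_chars (split_on_words_py text max_chars)

-- ===== LEMMAS AND PROOFS =====

-- The shared chunk decomposition of one word (proof-side; guarded by 1 ≤ m).
def pvChunks (m : Int) (w : List Char) : List (List Char) :=
  if _h : 1 ≤ m ∧ m < (w.length : Int) then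
    w.take m.toNat :: pvChunks m (w.drop m.toNat)
  else if w = [] then [] else [w]
termination_by w.length
decreasing_by simp; omega

-- Well-founded (fuel-free) restatement of A's while-loop (proof-side).
def pvHS (m : Int) (st : List (List Char) × List Char) (w : List Char) :
    List (List Char) × List Char × List Char :=
  if _h : 1 ≤ m ∧ m < (w.length : Int) then
    pvHS m ((if st.2 = [] then st.1 else st.1 ++ [st.2]) ++ [w.take m.toNat], []) (w.drop m.toNat)
  else (st.1, st.2, w)
termination_by w.length
decreasing_by simp; omega

-- Simulation relation: B's greedy state either equals A's, or lags by one full-width atom.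
def pvRel (m : Int) (sa sb : List (List Char) × List Char) : Prop :=
  sa = sb ∨ (sa.2 = [] ∧ sa.1 = sb.1 ++ [sb.2] ∧ ((sb.2.length : Int) = m))

lemma pvHardSplitA_eq_pvHS (m : Int) (hm : 1 ≤ m) :
    ∀ (fuel : Nat) (w : List Char) (st : List (List Char) × List Char), w.length ≤ fuel →
      pvHardSplitA m fuel st w = pvHS m st w := by
  intro fuel
  induction fuel with
  | zero =>
    intro w st h
    have hw : w = [] := List.length_eq_zero_iff.mp (Nat.le_zero.mp h)
    subst hw
    rw [pvHS]
    simp [pvHardSplitA]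
    omega
  | succ f ih =>
    intro w st h
    by_cases hc : m < (w.length : Int)
    · rw [pvHS, dif_pos ⟨hm, hc⟩]
      show pvHardSplitA m (f+1) st w = _
      rw [pvHardSplitA, if_pos hc,
        PySem.List.slice_to _ (by omega), PySem.List.slice_from _ (by omega)]
      exact ih _ _ (by simp; omega)
    · rw [pvHS, dif_neg (by omega)]
      show pvHardSplitA m (f+1) st w = _
      rw [pvHardSplitA, if_neg hc]

lemma pvStepA_hard (m : Int) (hm : 1 ≤ m) (st : List (List Char) × List Char) (w : List Char)
    (hlen : m < (w.length : Int)) :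
    pvStepA m st w =
      pvStepA m ((if st.2 = [] then st.1 else st.1 ++ [st.2]) ++ [w.take m.toNat], [])
        (w.drop m.toNat) := by
  unfold pvStepA
  rw [pvHardSplitA_eq_pvHS m hm _ _ _ le_rfl, pvHardSplitA_eq_pvHS m hm _ _ _ le_rfl,
    pvHS, dif_pos ⟨hm, hlen⟩]

lemma pvStepA_small (m : Int) (hm : 1 ≤ m) (st : List (List Char) × List Char) (w : List Char)
    (hlen : ¬ m < (w.length : Int)) :
    pvStepA m st w =
      if w = [] then (st.1, st.2)
      else if st.2 = [] then (st.1, w)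
      else if (st.2.length : Int) + 1 + (w.length : Int) ≤ m then (st.1, st.2 ++ ' ' :: w)
      else (st.1 ++ [st.2], w) := by
  unfold pvStepA
  rw [pvHardSplitA_eq_pvHS m hm _ _ _ le_rfl, pvHS, dif_neg (fun hc => hlen hc.2)]

lemma pvAtomsB_nat (mN : Nat) (hm : 1 ≤ mN) (w : List Char) :
    pvAtomsB (mN : Int) w =
      (List.range ((w.length + mN - 1) / mN)).map
        (fun k => (w.drop (mN * k)).take mN) := by
  unfold pvAtomsB
  rw [PySem.List.pyRange_of_pos _ _ (by exact_mod_cast hm)]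
  by_cases hw : w.length = 0
  · have : w = [] := List.length_eq_zero_iff.mp hw
    subst this
    simp
    omega
  · rw [if_pos (by exact_mod_cast Nat.pos_of_ne_zero hw)]
    have harith : (((w.length : Int) - 0 + mN - 1) / mN).toNat = (w.length + mN - 1) / mN := by
      have h1 : ((w.length : Int) - 0 + mN - 1) = ((w.length + mN - 1 : Nat) : Int) := by
        omega
      rw [h1, ← Int.natCast_div, Int.toNat_natCast]
    rw [harith, List.map_map]
    apply List.map_congr_left
    intro k hk
    show PySem.List.slice w (some (0 + mN * k)) (some (0 + mN * k + mN)) = _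
    have ha : ((0 : Int) + mN * k) = ((mN * k : Nat) : Int) := by push_cast; ring
    rw [ha]
    have hb : (((mN * k : Nat) : Int) + mN) = ((mN * k + mN : Nat) : Int) := by push_cast; ring
    rw [hb, PySem.List.slice_toNat _ (by positivity) (by positivity),
      Int.toNat_natCast, Int.toNat_natCast]
    congr 1
    omega

lemma pvAtomsB_eq_pvChunks (m : Int) (hm : 1 ≤ m) (w : List Char) :
    pvAtomsB m w = pvChunks m w := by
  obtain ⟨mN, rfl⟩ : ∃ mN : Nat, m = mN := ⟨m.toNat, (Int.toNat_of_nonneg (by omega)).symm⟩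
  have hmN : 1 ≤ mN := by exact_mod_cast hm
  suffices H : ∀ (n : Nat) (w : List Char), w.length ≤ n →
      pvAtomsB (mN : Int) w = pvChunks (mN : Int) w from H w.length w le_rfl
  intro n
  induction n with
  | zero =>
    intro w h
    have hw : w = [] := List.length_eq_zero_iff.mp (Nat.le_zero.mp h)
    subst hw
    rw [pvAtomsB_nat mN hmN, pvChunks, dif_neg (by simp), if_pos rfl]
    rw [Nat.div_eq_of_lt (by simp; omega)]
    simp
  | succ n ih =>
    intro w h
    have htoNat : ((mN : Int)).toNat = mN := Int.toNat_natCast mN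
    rw [pvAtomsB_nat mN hmN]
    by_cases hlen : mN < w.length
    · rw [pvChunks, dif_pos ⟨hm, by exact_mod_cast hlen⟩, htoNat]
      have hrange : (w.length + mN - 1) / mN = ((w.length - mN) + mN - 1) / mN + 1 := by
        have h1 : w.length + mN - 1 = (w.length - mN + mN - 1) + mN := by omega
        rw [h1, Nat.add_div_right _ (by omega)]
      rw [hrange, List.range_succ_eq_map, List.map_cons]
      congr 1
      · have ih' := ih (w.drop mN) (by simp; omega)
        rw [pvAtomsB_nat mN hmN] at ih'
        rw [← ih', List.map_map, List.length_drop]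
        apply List.map_congr_left
        intro k hk
        simp only [Function.comp, List.drop_drop, Nat.succ_eq_add_one, Nat.mul_add,
          Nat.mul_one]
        congr 2
        omega
    · rw [pvChunks, dif_neg (by omega)]
      by_cases hw : w = []
      · subst hw
        rw [if_pos rfl, Nat.div_eq_of_lt (by simp; omega)]
        simp
      · rw [if_neg hw]
        have hpos : 0 < w.length := List.length_pos_iff.mpr hw
        have hcount : (w.length + mN - 1) / mN = 1 := by
          have h1 : w.length + mN - 1 = (w.length - 1) + mN := by omega
          rw [h1, Nat.add_div_right _ (by omega), Nat.div_eq_of_lt (by omega)]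
        rw [hcount]
        simp
        omega

lemma pvStep_sim (m : Int) (hm : 1 ≤ m) :
    ∀ (w : List Char) (sa sb : List (List Char) × List Char), pvRel m sa sb →
      pvRel m (pvStepA m sa w) (List.foldl (pvStepB m) sb (pvChunks m w)) := by
  suffices H : ∀ (n : Nat) (w : List Char), w.length ≤ n →
      ∀ (sa sb : List (List Char) × List Char), pvRel m sa sb →
        pvRel m (pvStepA m sa w) (List.foldl (pvStepB m) sb (pvChunks m w)) from
    fun w => H w.length w le_rfl
  intro n
  induction n with
  | zero =>
    intro w h sa sb hrel
    have hw : w = [] := List.length_eq_zero_iff.mp (Nat.le_zero.mp h)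
    subst hw
    rw [pvChunks, dif_neg (by simp; omega), if_pos rfl, List.foldl_nil,
      pvStepA_small m hm _ _ (by simp; omega), if_pos rfl]
    simpa using hrel
  | succ n ih =>
    intro w h sa sb hrel
    by_cases hlen : m < (w.length : Int)
    · have htk : ((w.take m.toNat).length : Int) = m := by
        simp [List.length_take]
        omega
      rw [pvChunks, dif_pos ⟨hm, hlen⟩, List.foldl_cons,
        pvStepA_hard m hm _ _ hlen]
      apply ih (w.drop m.toNat) (by simp; omega)
      -- the new states are again related (B now lags by the full-width atom just flushed by A)
      rcases hrel with heq | ⟨h1, h2, h3⟩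
      · subst heq
        by_cases hcur : sa.2 = []
        · have hstep : pvStepB m sa (w.take m.toNat) = (sa.1, w.take m.toNat) := by
            rw [pvStepB, if_pos hcur]
          rw [if_pos hcur, hstep]
          exact Or.inr ⟨rfl, rfl, htk⟩
        · have hc2 : ¬ ((sa.2.length : Int) + 1 + ((w.take m.toNat).length : Int) ≤ m) := by
            rw [htk]; omega
          have hstep : pvStepB m sa (w.take m.toNat) = (sa.1 ++ [sa.2], w.take m.toNat) := by
            rw [pvStepB, if_neg hcur, if_neg hc2]
          rw [if_neg hcur, hstep]
          exact Or.inr ⟨rfl, rfl, htk⟩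
      · have hne : sb.2 ≠ [] := by
          intro hnil
          rw [hnil] at h3
          simp at h3
          omega
        have hc2 : ¬ ((sb.2.length : Int) + 1 + ((w.take m.toNat).length : Int) ≤ m) := by
          rw [htk, h3]; omega
        have hstep : pvStepB m sb (w.take m.toNat) = (sb.1 ++ [sb.2], w.take m.toNat) := by
          rw [pvStepB, if_neg hne, if_neg hc2]
        rw [if_pos h1, hstep]
        exact Or.inr ⟨rfl, by rw [h2], htk⟩
    · rw [pvChunks, dif_neg (fun hc => hlen hc.2), pvStepA_small m hm _ _ hlen]
      by_cases hw : w = []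
      · rw [if_pos hw, if_pos hw, List.foldl_nil]
        simpa using hrel
      · have hwpos : 1 ≤ (w.length : Int) := by
          have := List.length_pos_iff.mpr hw
          omega
        rw [if_neg hw, if_neg hw, List.foldl_cons, List.foldl_nil]
        rcases hrel with heq | ⟨h1, h2, h3⟩
        · subst heq
          left
          rw [pvStepB]
        · have hne : sb.2 ≠ [] := by
            intro hnil
            rw [hnil] at h3
            simp at h3
            omega
          have hc2 : ¬ ((sb.2.length : Int) + 1 + (w.length : Int) ≤ m) := by
            rw [h3]; omega
          rw [if_pos h1, pvStepB, if_neg hne, if_neg hc2, h2]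
          left
          rfl

lemma pvFold_sim (m : Int) (hm : 1 ≤ m) (ws : List (List Char))
    (sa sb : List (List Char) × List Char) (h : pvRel m sa sb) :
    pvRel m (ws.foldl (pvStepA m) sa)
      (List.foldl (pvStepB m) sb (ws.flatMap (pvAtomsB m))) := by
  induction ws generalizing sa sb with
  | nil => simpa using h
  | cons w ws ih =>
    rw [List.flatMap_cons, List.foldl_append, List.foldl_cons,
      pvAtomsB_eq_pvChunks m hm w]
    exact ih _ _ (pvStep_sim m hm w sa sb h)

lemma pvFinish (m : Int) (hm : 1 ≤ m) (ra rb : List (List Char) × List Char)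
    (h : pvRel m ra rb) :
    (if ra.2 = [] then ra.1 else ra.1 ++ [ra.2]) =
      (if rb.2 = [] then rb.1 else rb.1 ++ [rb.2]) := by
  rcases h with heq | ⟨h1, h2, h3⟩
  · rw [heq]
  · have hne : rb.2 ≠ [] := by
      intro hnil
      rw [hnil] at h3
      simp at h3
      omega
    rw [if_pos h1, if_neg hne, h2]

-- ===== VERDICT (by name: the statement is the Claim_ definition above) =====
theorem split_on_words_py_spec : Claim_equal_split_on_words_py := by
  intro text max_chars _hdom hpre
  unfold Spec_split_on_words_py
  rcases hpre with hm | hempty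
  · exact congrArg (List.map String.ofList)
      (pvFinish max_chars hm _ _
        (pvFold_sim max_chars hm (PySem.Chars.split₀ text.toList) ([], []) ([], [])
          (Or.inl rfl)))
  · simp [split_on_words_py, split_on_words_py_alt, hempty]
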